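-- pv_equiv track=rewrite | github.com/Thomatoketch/Projet_recherche_operationnel | function.py | calculer_penalites_balas_hammer
-- ===== SOURCE A (Python) =====
-- def calculer_penalites_balas_hammer(proposition, provisions, commandes, matrice_rempli):
--     m = len(commandes)
--     n = len(provisions)
--     couts = [ligne[:] for ligne in proposition]
--     penalites_lignes = []
--     penalites_colonnes = []
--
--     # Calcul des pénalités par ligne et par colonne
--     for i in range(n):
--         penalites_temp = []
--         for j in range(m):
--             if matrice_rempli[i][j] == 0 :
--                 penalites_temp.append(couts[i][j])
--         if len(penalites_temp) <= 1 :
--             penalites_lignes.append(0)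
--             continue
--         penalites_ligne = min(penalites_temp)
--         penalites_temp.remove(penalites_ligne)
--         penalites_ligne = min(penalites_temp)- penalites_ligne
--         penalites_lignes.append(penalites_ligne)
--
--
--     couts = [ligne[:] for ligne in proposition]
--     for i in range(m):
--         penalites_temp = []
--         for j in range(n):
--             if matrice_rempli[j][i] == 0 :
--                 penalites_temp.append(couts[j][i])
--         if len(penalites_temp) <= 1 :
--             penalites_colonnes.append(0)
--             continue
--         penalites_colonne = min(penalites_temp)
--         penalites_temp.remove(penalites_colonne)
--         penalites_colonne = min(penalites_temp)- penalites_colonne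
--         penalites_colonnes.append(penalites_colonne)
--
--     # Trouver la plus grande pénalité
--     penalite_max = max(penalites_lignes + penalites_colonnes)
--
--     # Vérifier si la plus grande pénalité est présente plusieurs fois
--     penalites_multiples = [i for i, penalite in enumerate(penalites_lignes) if penalite == penalite_max] + \
--                           [j + n for j, penalite in enumerate(penalites_colonnes) if penalite == penalite_max]
--
--     return penalites_lignes, penalites_colonnes, penalite_max, penalites_multiples
-- ===== SOURCE B (Python) =====
-- def calculer_penalites_balas_hammer(proposition, provisions, commandes, matrice_rempli):
--     m = len(commandes)
--     n = len(provisions)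
--
--     def _scan_penalty(coords):
--         # single streaming pass: track the two smallest (with multiplicity) and a count
--         m1 = m2 = None
--         c = 0
--         for (r, s) in coords:
--             if matrice_rempli[r][s] == 0:
--                 v = proposition[r][s]
--                 c += 1
--                 if m1 is None or v < m1:
--                     m1, m2 = v, m1
--                 elif m2 is None or v < m2:
--                     m2 = v
--         return m2 - m1 if c >= 2 else 0
--
--     rows = []
--     for i in range(n):
--         rows.append(_scan_penalty((i, j) for j in range(m)))
--     cols = []
--     for j in range(m):
--         cols.append(_scan_penalty((i, j) for i in range(n)))
--
--     # one-pass running max with tie-index collection over rows ++ cols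
--     pens = rows + cols
--     best = pens[0]
--     idxs = [0]
--     for k in range(1, len(pens)):
--         p = pens[k]
--         if p > best:
--             best = p
--             idxs = [k]
--         elif p == best:
--             idxs.append(k)
--     return rows, cols, best, idxs
-- ===== Notes on version B (the rewrite author's own statement) =====
-- stated objective: alternative
-- what changed: B replaces A's per-line temp-list build + min + remove + second min with a single streaming pass per row/column that tracks the two smallest zero-cell costs (with multiplicity) and a count, and replaces A's max() plus two enumerate-comprehensions with one running-max loop that collects tie indices on the fly.
import Mathlib
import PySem

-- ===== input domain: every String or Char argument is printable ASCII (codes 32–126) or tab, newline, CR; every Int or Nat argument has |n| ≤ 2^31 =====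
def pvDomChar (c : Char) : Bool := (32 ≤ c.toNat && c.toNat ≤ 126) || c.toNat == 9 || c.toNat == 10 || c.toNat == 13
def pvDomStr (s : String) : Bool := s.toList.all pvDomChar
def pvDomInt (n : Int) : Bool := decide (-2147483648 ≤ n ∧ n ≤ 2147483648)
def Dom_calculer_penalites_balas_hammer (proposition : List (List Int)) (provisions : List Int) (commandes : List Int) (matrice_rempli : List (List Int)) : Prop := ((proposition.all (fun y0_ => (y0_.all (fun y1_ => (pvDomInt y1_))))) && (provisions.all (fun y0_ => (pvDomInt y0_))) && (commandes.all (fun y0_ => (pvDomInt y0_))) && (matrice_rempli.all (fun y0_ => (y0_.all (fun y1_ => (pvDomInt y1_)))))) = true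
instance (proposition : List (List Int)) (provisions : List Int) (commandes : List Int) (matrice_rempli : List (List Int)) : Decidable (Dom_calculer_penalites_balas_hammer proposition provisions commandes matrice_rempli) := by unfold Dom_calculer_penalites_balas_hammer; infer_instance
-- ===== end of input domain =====

-- B replaces A's per-line temp-list/min/remove/min passes by a single streaming two-smallest
-- scan per row/column and a one-pass running-max-with-tie-indices loop (objective: alternative).

-- ===== PORT A =====
-- matrix cell access matrice_rempli[i][j] / proposition[i][j]; indices are in range under Pre_
def pvCell (xss : List (List Int)) (i j : Nat) : Int := (xss.getD i []).getD j 0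

-- min(temp); temp.remove(min); min(temp) - min  (exact under the len ≥ 2 branch guard)
def pvMinRemMin (temp : List Int) : Int :=
  let p := (PySem.List.min? temp (fun y => y)).getD 0
  let temp2 := (PySem.List.remove? temp p).getD []
  (PySem.List.min? temp2 (fun y => y)).getD 0 - p

def pvLigneTemp (couts remp : List (List Int)) (m i : Nat) : List Int :=
  (List.range m).foldl (fun t j => if pvCell remp i j == 0 then t ++ [pvCell couts i j] else t) []

def pvColTemp (couts remp : List (List Int)) (n i : Nat) : List Int :=
  (List.range n).foldl (fun t j => if pvCell remp j i == 0 then t ++ [pvCell couts j i] else t) []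

def calculer_penalites_balas_hammer (proposition : List (List Int)) (provisions : List Int) (commandes : List Int) (matrice_rempli : List (List Int)) : List Int × List Int × Int × List Int :=
  let m := commandes.length
  let n := provisions.length
  let couts := proposition
  let penalites_lignes := (List.range n).foldl (fun acc i =>
    if (pvLigneTemp couts matrice_rempli m i).length ≤ 1 then acc ++ [0]
    else acc ++ [pvMinRemMin (pvLigneTemp couts matrice_rempli m i)]) []
  let penalites_colonnes := (List.range m).foldl (fun acc i =>
    if (pvColTemp couts matrice_rempli n i).length ≤ 1 then acc ++ [0]
    else acc ++ [pvMinRemMin (pvColTemp couts matrice_rempli n i)]) []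
  let penalite_max := (PySem.List.max? (penalites_lignes ++ penalites_colonnes) (fun y => y)).getD 0
  let penalites_multiples :=
    ((PySem.List.enumerate penalites_lignes 0).filter (fun x => x.2 == penalite_max)).map (fun x => x.1) ++
    ((PySem.List.enumerate penalites_colonnes 0).filter (fun x => x.2 == penalite_max)).map (fun x => x.1 + (n : Int))
  (penalites_lignes, penalites_colonnes, penalite_max, penalites_multiples)

-- ===== PORT B =====
-- B's own cell accessor matrice_rempli[r][s] / proposition[r][s]; indices in range under Pre_
def pvCellB (xss : List (List Int)) (i j : Nat) : Int := (xss.getD i []).getD j 0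

-- streaming update of (two smallest so far with multiplicity, count)
def pvUpd (st : Option Int × Option Int × Nat) (v : Int) : Option Int × Option Int × Nat :=
  match st with
  | (none, _, c) => (some v, none, c + 1)
  | (some a, m2, c) =>
    if v < a then (some v, some a, c + 1)
    else
      match m2 with
      | none => (some a, some v, c + 1)
      | some b => if v < b then (some a, some v, c + 1) else (some a, some b, c + 1)

def pvPen (st : Option Int × Option Int × Nat) : Int :=
  if 2 ≤ st.2.2 then st.2.1.getD 0 - st.1.getD 0 else 0

def pvScan (prop remp : List (List Int)) (coords : List (Nat × Nat)) : Int :=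
  pvPen (coords.foldl (fun st c => if pvCellB remp c.1 c.2 == 0 then pvUpd st (pvCellB prop c.1 c.2) else st)
    ((none, none, 0) : Option Int × Option Int × Nat))

-- one step of the running max / tie-index loop
def pvStep (pens : List Int) (st : Int × List Int) (k : Int) : Int × List Int :=
  if st.1 < PySem.List.pyGetD pens k 0 then (PySem.List.pyGetD pens k 0, [k])
  else if PySem.List.pyGetD pens k 0 = st.1 then (st.1, st.2 ++ [k]) else st

def calculer_penalites_balas_hammer_alt (proposition : List (List Int)) (provisions : List Int) (commandes : List Int) (matrice_rempli : List (List Int)) : List Int × List Int × Int × List Int :=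
  let m := commandes.length
  let n := provisions.length
  let rows := (List.range n).foldl (fun acc i =>
    acc ++ [pvScan proposition matrice_rempli ((List.range m).map (fun j => (i, j)))]) []
  let cols := (List.range m).foldl (fun acc j =>
    acc ++ [pvScan proposition matrice_rempli ((List.range n).map (fun i => (i, j)))]) []
  let pens := rows ++ cols
  let res := (PySem.List.pyRange 1 (pens.length : Int)).foldl (pvStep pens) (PySem.List.pyGetD pens 0 0, ([0] : List Int))
  (rows, cols, res.1, res.2)

-- ===== PRECONDITION & SPEC =====
-- Pre_ excludes exactly the inputs where the Python A raises: IndexError when a needed cell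
-- matrice_rempli[i][j] (i < len(provisions), j < len(commandes)) or, for a zero cell, proposition[i][j]
-- is missing, and ValueError from max([]) when provisions and commandes are both empty.
def Pre_calculer_penalites_balas_hammer (proposition : List (List Int)) (provisions : List Int) (commandes : List Int) (matrice_rempli : List (List Int)) : Prop :=
  (provisions ≠ [] ∨ commandes ≠ []) ∧
  ∀ i < provisions.length, ∀ j < commandes.length,
    i < matrice_rempli.length ∧ j < (matrice_rempli.getD i []).length ∧
    ((matrice_rempli.getD i []).getD j 0 = 0 → i < proposition.length ∧ j < (proposition.getD i []).length)
instance (proposition : List (List Int)) (provisions : List Int) (commandes : List Int) (matrice_rempli : List (List Int)) : Decidable (Pre_calculer_penalites_balas_hammer proposition provisions commandes matrice_rempli) := by unfold Pre_calculer_penalites_balas_hammer; infer_instance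

def pvWitness_calculer_penalites_balas_hammer : List (List Int) × List Int × List Int × List (List Int) :=
  ([[1, 2], [3, 4]], [10, 20], [5, 5], [[0, 0], [0, 0]])

def Spec_calculer_penalites_balas_hammer (proposition : List (List Int)) (provisions : List Int) (commandes : List Int) (matrice_rempli : List (List Int)) (out : List Int × List Int × Int × List Int) : Prop := out = calculer_penalites_balas_hammer_alt proposition provisions commandes matrice_rempli
instance (proposition : List (List Int)) (provisions : List Int) (commandes : List Int) (matrice_rempli : List (List Int)) (out : List Int × List Int × Int × List Int) : Decidable (Spec_calculer_penalites_balas_hammer proposition provisions commandes matrice_rempli out) := by unfold Spec_calculer_penalites_balas_hammer; infer_instance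

-- ===== CLAIM (what is proved, stated in full; the proofs are below) =====
def Claim_equal_calculer_penalites_balas_hammer : Prop := ∀ (proposition : List (List Int)) (provisions : List Int) (commandes : List Int) (matrice_rempli : List (List Int)), Dom_calculer_penalites_balas_hammer proposition provisions commandes matrice_rempli → Pre_calculer_penalites_balas_hammer proposition provisions commandes matrice_rempli → Spec_calculer_penalites_balas_hammer proposition provisions commandes matrice_rempli (calculer_penalites_balas_hammer proposition provisions commandes matrice_rempli)

-- ===== LEMMAS AND PROOFS =====

-- first (= least) minimum and, after erasing one copy, the second minimum
def pvMin (L : List Int) : Option Int := match L with | [] => none | x :: t => some (t.foldl min x)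
def pvMax (L : List Int) : Option Int := match L with | [] => none | x :: t => some (t.foldl max x)
def pvSecond (L : List Int) : Option Int := match pvMin L with | none => none | some a => pvMin (L.erase a)
def pvIOM (L : List Int) (s mx : Int) : List Int :=
  ((PySem.List.enumerate L s).filter (fun x => x.2 == mx)).map (fun x => x.1)

lemma pvMin_eq_none {L : List Int} : pvMin L = none ↔ L = [] := by cases L <;> simp [pvMin]

lemma pvMin_mem {L : List Int} {a : Int} (h : pvMin L = some a) : a ∈ L := by
  cases L with
  | nil => simp [pvMin] at h
  | cons x t =>
    simp only [pvMin, Option.some.injEq] at h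
    subst h
    rcases PySem.List.foldl_min_mem t x with h' | h'
    · rw [h']; exact List.mem_cons_self
    · exact List.mem_cons_of_mem _ h' 

lemma pvMin_le {L : List Int} {a : Int} (h : pvMin L = some a) : ∀ y ∈ L, a ≤ y := by
  cases L with
  | nil => simp [pvMin] at h
  | cons x t =>
    simp [pvMin] at h
    intro y hy
    rcases List.mem_cons.mp hy with rfl | hy
    · exact h ▸ (PySem.List.foldl_min_le t y).1
    · exact h ▸ (PySem.List.foldl_min_le t x).2 y hy

lemma pvMax_isMax {L : List Int} {a : Int} (h : pvMax L = some a) : ∀ y ∈ L, y ≤ a := by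
  cases L with
  | nil => simp [pvMax] at h
  | cons x t =>
    simp [pvMax] at h
    intro y hy
    rcases List.mem_cons.mp hy with rfl | hy
    · exact h ▸ (PySem.List.le_foldl_max t y).1
    · exact h ▸ (PySem.List.le_foldl_max t x).2 y hy

lemma pvMin_append_singleton (L : List Int) (v : Int) :
    pvMin (L ++ [v]) = some ((pvMin L).elim v (fun a => min a v)) := by
  cases L with
  | nil => simp [pvMin]
  | cons x t => simp [pvMin, List.foldl_append]

lemma pvMax_append_singleton (L : List Int) (v : Int) :
    pvMax (L ++ [v]) = some ((pvMax L).elim v (fun a => max a v)) := by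
  cases L with
  | nil => simp [pvMax]
  | cons x t => simp [pvMax, List.foldl_append]

lemma pvMin_bridge (L : List Int) : PySem.List.min? L (fun y => y) = pvMin L := by
  cases L with
  | nil => simp [pvMin, PySem.List.min?_eq_none_iff]
  | cons x t => rw [PySem.List.min?_id_cons]; rfl

lemma pvMax_bridge (L : List Int) : PySem.List.max? L (fun y => y) = pvMax L := by
  cases L with
  | nil => simp [pvMax, PySem.List.max?_eq_none_iff]
  | cons x t => rw [PySem.List.max?_id_cons]; rfl

-- streaming state after scanning L = (min, second min with multiplicity, length)
lemma pvUpd_S (L : List Int) (v : Int) :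
    pvUpd (pvMin L, pvSecond L, L.length) v = (pvMin (L ++ [v]), pvSecond (L ++ [v]), (L ++ [v]).length) := by
  rcases hL : pvMin L with _ | a
  · have hnil : L = [] := pvMin_eq_none.mp hL
    subst hnil
    simp [pvUpd, pvMin, pvSecond]
  · have haL : a ∈ L := pvMin_mem hL
    have hminapp : pvMin (L ++ [v]) = some (min a v) := by
      rw [pvMin_append_singleton, hL]; rfl
    have hS2 : pvSecond (L ++ [v]) = pvMin ((L ++ [v]).erase (min a v)) := by
      simp [pvSecond, hminapp]
    by_cases hv : v < a
    · have hvnot : v ∉ L := fun hmem => absurd (pvMin_le hL v hmem) (by omega)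
      have herase : (L ++ [v]).erase v = L := by
        rw [List.erase_append_right _ hvnot]; simp
      have hmin : min a v = v := by omega
      rw [hminapp, hS2, hmin, herase, hL]
      simp [pvUpd, hv]
    · have hmin : min a v = a := by omega
      have herase : (L ++ [v]).erase a = L.erase a ++ [v] := List.erase_append_left _ haL
      have hSL : pvSecond L = pvMin (L.erase a) := by simp [pvSecond, hL]
      rw [hminapp, hS2, hmin, herase, pvMin_append_singleton, hSL]
      rcases hs : pvMin (L.erase a) with _ | b
      · simp [pvUpd, hv]
      · simp only [pvUpd, Option.elim]
        rw [if_neg hv]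
        by_cases h1 : v < b
        · rw [if_pos h1, min_eq_right (le_of_lt h1)]
          simp
        · rw [if_neg h1, min_eq_left (by omega)]
          simp

lemma scan_state (L : List Int) :
    L.foldl pvUpd ((none, none, 0) : Option Int × Option Int × Nat) = (pvMin L, pvSecond L, L.length) := by
  induction L using List.reverseRecOn with
  | nil => simp [pvMin, pvSecond]
  | append_singleton l q ih => rw [List.foldl_append]; simp only [List.foldl]; rw [ih, pvUpd_S]

-- the streaming penalty equals A's temp-list computation
lemma pen_eq (L : List Int) :
    pvPen (L.foldl pvUpd ((none, none, 0) : Option Int × Option Int × Nat)) =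
      if L.length ≤ 1 then 0 else pvMinRemMin L := by
  rw [scan_state]
  by_cases h : L.length ≤ 1
  · rw [if_pos h]
    match L, h with
    | [], _ => simp [pvPen]
    | [x], _ => simp [pvPen]
  · rw [if_neg h]
    have h2 : 2 ≤ L.length := by omega
    rcases hL : pvMin L with _ | a
    · exact absurd (pvMin_eq_none.mp hL) (by intro hnil; simp [hnil] at h2)
    · have haL : a ∈ L := pvMin_mem hL
      have hlen : (L.erase a).length = L.length - 1 := List.length_erase_of_mem haL
      rcases hS : pvMin (L.erase a) with _ | b
      · have : L.erase a = [] := pvMin_eq_none.mp hS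
        rw [this] at hlen; simp at hlen; omega
      · simp only [pvPen, pvSecond, hL, hS]
        rw [if_pos h2]
        simp only [Option.getD_some]
        have hrm : PySem.List.remove? L a = some (L.erase a) := PySem.List.remove?_eq_some_erase L a haL
        simp [pvMinRemMin, pvMin_bridge, hL, hrm, hS]

-- generic loop shapes
lemma foldl_if_upd {α : Type} (l : List α) (p : α → Bool) (f : α → Int)
    (st : Option Int × Option Int × Nat) :
    l.foldl (fun st x => if p x then pvUpd st (f x) else st) st =
      ((l.filter p).map f).foldl pvUpd st := by
  induction l generalizing st with
  | nil => rfl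
  | cons x t ih => by_cases hx : p x <;> simp [hx, ih]

lemma foldl_ite_append {α : Type} (l : List α) (c : α → Prop) [DecidablePred c]
    (x y : α → Int) (acc : List Int) :
    l.foldl (fun acc i => if c i then acc ++ [x i] else acc ++ [y i]) acc =
      acc ++ l.map (fun i => if c i then x i else y i) := by
  induction l generalizing acc with
  | nil => simp
  | cons a t ih => by_cases ha : c a <;> simp [ha, ih]

lemma pvCellB_eq : pvCellB = pvCell := rfl

lemma row_eq (prop remp : List (List Int)) (m i : Nat) :
    pvScan prop remp ((List.range m).map (fun j => (i, j))) =
      if (pvLigneTemp prop remp m i).length ≤ 1 then 0 else pvMinRemMin (pvLigneTemp prop remp m i) := by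
  unfold pvScan pvLigneTemp
  rw [pvCellB_eq, List.foldl_map]
  simp only []
  rw [foldl_if_upd _ (fun j => pvCell remp i j == 0) (fun j => pvCell prop i j), pen_eq,
    PySem.List.foldl_append_if (fun j => pvCell remp i j == 0) (fun j => pvCell prop i j)]
  simp

lemma col_eq (prop remp : List (List Int)) (n i : Nat) :
    pvScan prop remp ((List.range n).map (fun j => (j, i))) =
      if (pvColTemp prop remp n i).length ≤ 1 then 0 else pvMinRemMin (pvColTemp prop remp n i) := by
  unfold pvScan pvColTemp
  rw [pvCellB_eq, List.foldl_map]
  simp only []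
  rw [foldl_if_upd _ (fun j => pvCell remp j i == 0) (fun j => pvCell prop j i), pen_eq,
    PySem.List.foldl_append_if (fun j => pvCell remp j i == 0) (fun j => pvCell prop j i)]
  simp

-- enumerate with a shifted start
lemma enumerate_shift (xs : List Int) (s t : Int) :
    PySem.List.enumerate xs (s + t) = (PySem.List.enumerate xs s).map (fun p => (p.1 + t, p.2)) := by
  induction xs generalizing s with
  | nil => simp [PySem.List.enumerate_nil]
  | cons x xs ih =>
    rw [PySem.List.enumerate_cons, PySem.List.enumerate_cons]
    have : s + t + 1 = (s + 1) + t := by ring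
    simp [this, ih]

lemma iom_shift (L : List Int) (t mx : Int) :
    ((PySem.List.enumerate L 0).filter (fun x => x.2 == mx)).map (fun x => x.1 + t) = pvIOM L t mx := by
  unfold pvIOM
  rw [show PySem.List.enumerate L t = PySem.List.enumerate L (0 + t) by rw [zero_add],
    enumerate_shift, List.filter_map, List.map_map]
  have h1 : ((fun x : Int × Int => x.1) ∘ fun p : Int × Int => (p.1 + t, p.2)) =
      fun x : Int × Int => x.1 + t := by funext p; rfl
  have h2 : ((fun x : Int × Int => x.2 == mx) ∘ fun p : Int × Int => (p.1 + t, p.2)) =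
      fun x : Int × Int => x.2 == mx := by funext p; rfl
  rw [h1, h2]

lemma pvIOM_def0 (L : List Int) (mx : Int) :
    ((PySem.List.enumerate L 0).filter (fun x => x.2 == mx)).map (fun x => x.1) = pvIOM L 0 mx := rfl

lemma pvIOM_append (l1 l2 : List Int) (s mx : Int) :
    pvIOM (l1 ++ l2) s mx = pvIOM l1 s mx ++ pvIOM l2 (s + l1.length) mx := by
  simp [pvIOM, PySem.List.enumerate_append]

lemma pvIOM_singleton (q : Int) (s mx : Int) :
    pvIOM [q] s mx = if q == mx then [s] else [] := by
  simp only [pvIOM, PySem.List.enumerate_cons, PySem.List.enumerate_nil]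
  by_cases h : q == mx <;> simp [h]

lemma pvIOM_gt {l : List Int} {a : Int} (hmax : ∀ y ∈ l, y ≤ a) {q : Int} (hq : a < q) (s : Int) :
    pvIOM l s q = [] := by
  unfold pvIOM
  rw [List.filter_eq_nil_iff.mpr, List.map_nil]
  intro x hx
  have hx2 : x.2 ∈ l := by
    have := PySem.List.map_snd_enumerate l s
    exact this ▸ List.mem_map_of_mem hx
  have : x.2 ≤ a := hmax _ hx2
  simp only [beq_iff_eq]
  omega

-- the one-pass running max / tie-index loop
lemma maxscan (ps : List Int) (hps : ps ≠ []) :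
    (PySem.List.pyRange 1 (ps.length : Int)).foldl (pvStep ps) (PySem.List.pyGetD ps 0 0, ([0] : List Int)) =
      ((pvMax ps).getD 0, pvIOM ps 0 ((pvMax ps).getD 0)) := by
  induction ps using List.reverseRecOn with
  | nil => exact absurd rfl hps
  | append_singleton l q ih =>
    rcases eq_or_ne l [] with rfl | hl
    · have h11 : PySem.List.pyRange 1 ((([] ++ [q] : List Int)).length : Int) = [] := by
        apply PySem.List.pyRange_one_eq_nil; simp
      rw [h11]
      simp [pvMax, pvIOM_singleton, PySem.List.pyGetD_zero]
    · have hlpos : 0 < l.length := List.length_pos_of_ne_nil hl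
      have hlen : (((l ++ [q]).length : Nat) : Int) = (l.length : Int) + 1 := by
        simp [List.length_append]
      rw [hlen, PySem.List.pyRange_one_succ_right (by exact_mod_cast hlpos), List.foldl_append]
      have hinit : PySem.List.pyGetD (l ++ [q]) 0 0 = PySem.List.pyGetD l 0 0 := by
        obtain ⟨x, t, rfl⟩ := List.exists_cons_of_ne_nil hl
        simp [PySem.List.pyGetD_zero]
      have hcongr : ∀ (acc : Int × List Int), ∀ k ∈ PySem.List.pyRange 1 (l.length : Int),
          pvStep (l ++ [q]) acc k = pvStep l acc k := by
        intro acc k hk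
        obtain ⟨h1k, hkL⟩ := PySem.List.mem_pyRange_one.mp hk
        have hget : PySem.List.pyGetD (l ++ [q]) k 0 = PySem.List.pyGetD l k 0 := by
          rw [PySem.List.pyGetD_eq_getElem _ _ (by omega) (by simp [List.length_append]; omega),
              PySem.List.pyGetD_eq_getElem _ _ (by omega) (by omega)]
          exact List.getElem_append_left (by omega)
        simp [pvStep, hget]
      rw [hinit, PySem.List.foldl_congr_mem _ _ _ _ hcongr, ih hl]
      have hq : PySem.List.pyGetD (l ++ [q]) (l.length : Int) 0 = q := by
        rw [PySem.List.pyGetD_eq_getElem _ _ (by positivity) (by simp [List.length_append])]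
        rw [List.getElem_concat_length (by simp)]
      rcases hM : pvMax l with _ | a
      · exact absurd hM (by cases l with | nil => exact absurd rfl hl | cons x t => simp [pvMax])
      · have hisMax := pvMax_isMax hM
        rw [pvMax_append_singleton, hM]
        simp only [Option.elim, Option.getD_some]
        simp only [List.foldl_cons, List.foldl_nil, pvStep, hq]
        rcases lt_trichotomy a q with hlt | heq | hgt
        · rw [if_pos hlt, max_eq_right (le_of_lt hlt)]
          rw [pvIOM_append l [q], pvIOM_gt hisMax hlt, pvIOM_singleton]
          simp
        · subst heq
          rw [if_neg (lt_irrefl _), if_pos rfl, max_self]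
          rw [pvIOM_append l [a], pvIOM_singleton]
          simp
        · rw [if_neg (by omega), if_neg (by omega), max_eq_left (le_of_lt hgt)]
          rw [pvIOM_append l [q], pvIOM_singleton]
          have : (q == a) = false := by simp; omega
          simp [this]

-- ===== VERDICT (by name: the statement is the Claim_ definition above) =====
theorem calculer_penalites_balas_hammer_spec : Claim_equal_calculer_penalites_balas_hammer := by
  intro proposition provisions commandes matrice_rempli _hDom hPre
  unfold Spec_calculer_penalites_balas_hammer
  unfold calculer_penalites_balas_hammer calculer_penalites_balas_hammer_alt
  simp only []
  set m := commandes.length with hm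
  set n := provisions.length with hn
  have hrows : (List.range n).foldl (fun acc i =>
      if (pvLigneTemp proposition matrice_rempli m i).length ≤ 1 then acc ++ [0]
      else acc ++ [pvMinRemMin (pvLigneTemp proposition matrice_rempli m i)]) [] =
      (List.range n).foldl (fun acc i =>
      acc ++ [pvScan proposition matrice_rempli ((List.range m).map (fun j => (i, j)))]) [] := by
    rw [foldl_ite_append, PySem.List.foldl_append_singleton_eq_map]
    simp only [List.nil_append]
    apply List.map_congr_left
    intro i _
    rw [row_eq]
  have hcols : (List.range m).foldl (fun acc i =>
      if (pvColTemp proposition matrice_rempli n i).length ≤ 1 then acc ++ [0]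
      else acc ++ [pvMinRemMin (pvColTemp proposition matrice_rempli n i)]) [] =
      (List.range m).foldl (fun acc j =>
      acc ++ [pvScan proposition matrice_rempli ((List.range n).map (fun i => (i, j)))]) [] := by
    rw [foldl_ite_append, PySem.List.foldl_append_singleton_eq_map]
    simp only [List.nil_append]
    apply List.map_congr_left
    intro i _
    rw [col_eq]
  rw [hrows, hcols]
  set rows := (List.range n).foldl (fun acc i =>
      acc ++ [pvScan proposition matrice_rempli ((List.range m).map (fun j => (i, j)))]) [] with hrowsdef
  set cols := (List.range m).foldl (fun acc j =>
      acc ++ [pvScan proposition matrice_rempli ((List.range n).map (fun i => (i, j)))]) [] with hcolsdef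
  have hlrows : rows.length = n := by
    rw [hrowsdef, PySem.List.foldl_append_singleton_eq_map]; simp
  have hlcols : cols.length = m := by
    rw [hcolsdef, PySem.List.foldl_append_singleton_eq_map]; simp
  have hne : rows ++ cols ≠ [] := by
    intro hnil
    obtain ⟨hr, hc⟩ := List.append_eq_nil_iff.mp hnil
    rcases hPre.1 with h | h
    · refine h (List.length_eq_zero_iff.mp ?_)
      rw [hr] at hlrows
      simp at hlrows
      omega
    · refine h (List.length_eq_zero_iff.mp ?_)
      rw [hc] at hlcols
      simp at hlcols
      omega
  rw [maxscan _ hne]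
  refine Prod.ext rfl (Prod.ext rfl (Prod.ext ?_ ?_)) <;> simp only []
  · rw [pvMax_bridge]
  · rw [pvMax_bridge]
    rw [pvIOM_def0, iom_shift cols (n : Int)]
    rw [show ((n : Nat) : Int) = 0 + (rows.length : Int) by rw [hlrows]; ring]
    rw [← pvIOM_append]
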